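-- pv_equiv track=rewrite | github.com/Mitchellpkt/foobar | generators.py | doubling
-- ===== SOURCE A (Python) =====
-- from typing import List, Generator
--
-- def doubling(batch_size: int = 3, max_val: int = 1000) -> Generator[List[int], None, None]:
--     """
--     Example of a batched generator with finite outputs.
--     Doubles internal state `i` repeatedly (remembered within/between calls).
--     Each call from an outside loop yields a batch of `batch_size` values.
--     After max_value is hit, the generator stops.
--
--     :param batch_size: The number of doubled values to yield per batch.
--     :param max_val: The maximum value of `i` at which the generator stops.
--     :return: Yields lists of integers.
--     """
--
--     # Initialized once (not reset between calls!)
--     i: int = 1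
--
--     # For a given call that doesn't exhaust the generator...
--     while i < max_val:
--
--         # Build the batch
--         batch_result: List[int] = []  # Collect results in a batch
--         while len(batch_result) < batch_size and i < max_val:
--             batch_result.append(i)
--             i *= 2  # Double the value of i
--
--         yield batch_result  # << Code & state freezes here! (until next call)
-- ===== SOURCE B (Python) =====
-- from typing import List, Generator
--
-- def doubling(batch_size: int = 3, max_val: int = 1000) -> Generator[List[int], None, None]:
--     # Two passes: first materialize the whole doubling sequence, then chunk it by index.
--     vals: List[int] = []
--     i = 1
--     while i < max_val:
--         vals.append(i)
--         i *= 2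
--     j = 0
--     while j < len(vals):
--         yield vals[j:j + batch_size]
--         j += batch_size
-- ===== Notes on version B (the rewrite author's own statement) =====
-- stated objective: alternative
-- what changed: A's single interleaved generate-and-group nested loop is split into two independent passes: one pass materializes the doubling sequence into a list, then a separate index-stepping pass slices it into batches.
import Mathlib
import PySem

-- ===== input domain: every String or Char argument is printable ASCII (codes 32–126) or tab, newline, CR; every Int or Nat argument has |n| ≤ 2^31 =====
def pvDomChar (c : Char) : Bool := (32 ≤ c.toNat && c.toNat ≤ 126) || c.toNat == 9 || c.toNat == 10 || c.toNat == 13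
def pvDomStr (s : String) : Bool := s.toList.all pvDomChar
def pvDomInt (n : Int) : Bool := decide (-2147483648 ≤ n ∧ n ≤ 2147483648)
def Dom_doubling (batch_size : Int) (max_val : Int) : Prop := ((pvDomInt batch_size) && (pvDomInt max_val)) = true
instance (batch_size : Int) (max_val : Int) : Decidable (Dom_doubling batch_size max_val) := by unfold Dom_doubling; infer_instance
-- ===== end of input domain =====

-- B replaces A's single interleaved generate-and-group nested loop by two separate passes
-- (materialize the doubling sequence, then chunk it by a stepping index); same cost, proved equal on Pre_.
-- The Nat fuel arguments below are totality devices only: each fuel bound is provably enough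
-- (inner loop appends one element per step; the other loops advance i or j by at least 1 per step),
-- so on every input the loops stop by their own guards, never by fuel — except where the Python
-- itself never terminates (batch_size ≤ 0 with 1 < max_val), which Pre_ excludes.

-- ===== PORT A =====
-- inner while: while len(batch_result) < batch_size and i < max_val: batch_result.append(i); i *= 2
def pvInnerA (batch_size max_val : Int) : Nat → Int → List Int → List Int × Int
  | 0, i, batch => (batch, i)
  | fuel + 1, i, batch =>
    if (batch.length : Int) < batch_size ∧ i < max_val then
      pvInnerA batch_size max_val fuel (i * 2) (batch ++ [i])
    else (batch, i)

-- outer while i < max_val: build a batch, yield it.  The extra '0 < batch_size ∧ 1 ≤ i'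
-- conjuncts are totality guards only: with batch_size ≤ 0 Python never advances i (it diverges,
-- excluded by Pre_), and i = 1 initially so 1 ≤ i always holds on the real runs.
def pvOuterA (batch_size max_val : Int) : Nat → Int → List (List Int)
  | 0, _ => []
  | fuel + 1, i =>
    if 0 < batch_size ∧ 1 ≤ i ∧ i < max_val then
      (pvInnerA batch_size max_val batch_size.toNat i []).1 ::
        pvOuterA batch_size max_val fuel (pvInnerA batch_size max_val batch_size.toNat i []).2
    else []

def doubling (batch_size : Int) (max_val : Int) : List (List Int) :=
  pvOuterA batch_size max_val max_val.toNat 1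

-- ===== PORT B =====
-- first pass: i = 1; while i < max_val: vals.append(i); i *= 2
-- ('1 ≤ i' conjunct is a totality guard; i starts at 1 and only doubles)
def pvGenB (max_val : Int) : Nat → Int → List Int
  | 0, _ => []
  | fuel + 1, i => if 1 ≤ i ∧ i < max_val then i :: pvGenB max_val fuel (i * 2) else []

-- second pass: j = 0; while j < len(vals): yield vals[j:j+batch_size]; j += batch_size
-- ('0 < batch_size' conjunct is a totality guard: Python diverges there, excluded by Pre_)
def pvChunkB (batch_size : Int) (vals : List Int) : Nat → Int → List (List Int)
  | 0, _ => []
  | fuel + 1, j =>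
    if 0 < batch_size ∧ j < (vals.length : Int) then
      PySem.List.slice vals (some j) (some (j + batch_size)) ::
        pvChunkB batch_size vals fuel (j + batch_size)
    else []

def doubling_alt (batch_size : Int) (max_val : Int) : List (List Int) :=
  pvChunkB batch_size (pvGenB max_val max_val.toNat 1) (pvGenB max_val max_val.toNat 1).length 0

-- ===== PRECONDITION & SPEC =====
-- Pre_ excludes exactly the inputs (batch_size ≤ 0 and 1 < max_val) on which Python A never
-- terminates (i is never advanced, it yields empty batches forever); B also diverges there.
def Pre_doubling (batch_size : Int) (max_val : Int) : Prop := 0 < batch_size ∨ max_val ≤ 1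
instance (batch_size : Int) (max_val : Int) : Decidable (Pre_doubling batch_size max_val) := by unfold Pre_doubling; infer_instance
def pvWitness_doubling : Int × Int := (3, 1000)

def Spec_doubling (batch_size : Int) (max_val : Int) (out : List (List Int)) : Prop := out = doubling_alt batch_size max_val
instance (batch_size : Int) (max_val : Int) (out : List (List Int)) : Decidable (Spec_doubling batch_size max_val out) := by unfold Spec_doubling; infer_instance

-- ===== CLAIM (what is proved, stated in full; the proofs are below) =====
def Claim_equal_doubling : Prop := ∀ (batch_size : Int) (max_val : Int), Dom_doubling batch_size max_val → Pre_doubling batch_size max_val → Spec_doubling batch_size max_val (doubling batch_size max_val)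

-- ===== LEMMAS AND PROOFS =====

-- proof-side chunking of a plain list
def pvChunkL (batch_size : Int) (l : List Int) : List (List Int) :=
  if l = [] ∨ batch_size ≤ 0 then []
  else l.take batch_size.toNat :: pvChunkL batch_size (l.drop batch_size.toNat)
termination_by l.length
decreasing_by
  rename_i h
  rw [not_or] at h
  have : l.length ≠ 0 := by simpa [List.length_eq_zero_iff] using h.1
  simp only [List.length_drop]; omega

-- the generation pass is fuel-independent once fuel ≥ (max_val - i): i advances by ≥ 1 per step
theorem pvGenB_fuel (max_val : Int) :
    ∀ (n m : Nat) (i : Int), 1 ≤ i → (max_val - i).toNat ≤ n → (max_val - i).toNat ≤ m →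
      pvGenB max_val n i = pvGenB max_val m i := by
  intro n
  induction n with
  | zero =>
    intro m i hi hn _
    cases m with
    | zero => rfl
    | succ m => simp only [pvGenB]; rw [if_neg (by omega)]
  | succ n ih =>
    intro m i hi hn hm
    cases m with
    | zero => simp only [pvGenB]; rw [if_neg (by omega)]
    | succ m =>
      simp only [pvGenB]
      by_cases hlt : i < max_val
      · rw [if_pos ⟨hi, hlt⟩, if_pos ⟨hi, hlt⟩, ih m (i * 2) (by omega) (by omega) (by omega)]
      · rw [if_neg (by omega), if_neg (by omega)]

-- canonical materialized sequence (fixed sufficient fuel)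
def pvGen (max_val i : Int) : List Int := pvGenB max_val (max_val - i).toNat i

theorem pvGen_cons (max_val i : Int) (hi : 1 ≤ i) (h : i < max_val) :
    pvGen max_val i = i :: pvGen max_val (i * 2) := by
  unfold pvGen
  have hk : (max_val - i).toNat = ((max_val - i).toNat - 1) + 1 := by omega
  rw [hk]
  simp only [pvGenB]
  rw [if_pos ⟨hi, h⟩]
  rw [pvGenB_fuel max_val ((max_val - i).toNat - 1) (max_val - i * 2).toNat (i * 2)
        (by omega) (by omega) (by omega)]

theorem pvGen_nil (max_val i : Int) (h : ¬ i < max_val) : pvGen max_val i = [] := by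
  unfold pvGen
  rw [show (max_val - i).toNat = 0 from by omega]
  rfl

-- A's inner loop = take/drop of the materialized sequence; its exit value of i resumes the sequence
theorem pvInnerA_spec (batch_size max_val : Int) :
    ∀ (fuel : Nat) (i : Int) (batch : List Int), 1 ≤ i →
      (batch_size - (batch.length : Int)).toNat ≤ fuel →
      (pvInnerA batch_size max_val fuel i batch).1 =
        batch ++ (pvGen max_val i).take (batch_size - (batch.length : Int)).toNat ∧
      pvGen max_val (pvInnerA batch_size max_val fuel i batch).2 =
        (pvGen max_val i).drop (batch_size - (batch.length : Int)).toNat ∧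
      i ≤ (pvInnerA batch_size max_val fuel i batch).2 ∧
      1 ≤ (pvInnerA batch_size max_val fuel i batch).2 ∧
      (((batch.length : Int) < batch_size ∧ i < max_val ∧ 1 ≤ fuel) →
        i < (pvInnerA batch_size max_val fuel i batch).2) := by
  intro fuel
  induction fuel with
  | zero =>
    intro i batch hi hf
    have hk : (batch_size - (batch.length : Int)).toNat = 0 := by omega
    simp [pvInnerA, hk, hi]
  | succ fuel ih =>
    intro i batch hi hf
    simp only [pvInnerA]
    by_cases hg : (batch.length : Int) < batch_size ∧ i < max_val
    · rw [if_pos hg]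
      obtain ⟨ih1, ih2, ih3, ih4, _⟩ :=
        ih (i * 2) (batch ++ [i]) (by omega)
          (by simp only [List.length_append, List.length_cons, List.length_nil]; omega)
      have hg' := pvGen_cons max_val i hi hg.2
      have hk : (batch_size - (batch.length : Int)).toNat
          = (batch_size - ((batch ++ [i]).length : Int)).toNat + 1 := by
        simp only [List.length_append, List.length_cons, List.length_nil]; omega
      refine ⟨?_, ?_, by omega, by omega, fun _ => by omega⟩
      · rw [ih1, hg', hk, List.take_succ_cons, List.append_assoc]; rfl
      · rw [ih2, hg', hk, List.drop_succ_cons]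
    · rw [if_neg hg]
      rcases Classical.em ((batch.length : Int) < batch_size) with hlen | hlen
      · have hge : ¬ i < max_val := fun hc => hg ⟨hlen, hc⟩
        rw [pvGen_nil max_val i hge]
        simp [hi]
        omega
      · have hk : (batch_size - (batch.length : Int)).toNat = 0 := by omega
        simp [hk, hi]
        omega

-- A's outer loop = chunking of the materialized sequence
theorem pvOuterA_eq (batch_size max_val : Int) (hb : 0 < batch_size) :
    ∀ (fuel : Nat) (i : Int), 1 ≤ i → (max_val - i).toNat ≤ fuel →
      pvOuterA batch_size max_val fuel i = pvChunkL batch_size (pvGen max_val i) := by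
  intro fuel
  induction fuel with
  | zero =>
    intro i hi hf
    rw [pvGen_nil max_val i (by omega), pvChunkL, if_pos (Or.inl rfl)]
    rfl
  | succ fuel ih =>
    intro i hi hf
    simp only [pvOuterA]
    by_cases hlt : i < max_val
    · rw [if_pos ⟨hb, hi, hlt⟩]
      obtain ⟨s1, s2, s3, s4, s5⟩ :=
        pvInnerA_spec batch_size max_val batch_size.toNat i [] hi (by simp)
      have hg := pvGen_cons max_val i hi hlt
      have hne : pvGen max_val i ≠ [] := by rw [hg]; simp
      rw [pvChunkL, if_neg (by rw [not_or]; exact ⟨hne, by omega⟩)]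
      have hi' : i < (pvInnerA batch_size max_val batch_size.toNat i []).2 :=
        s5 ⟨by simpa using hb, hlt, by omega⟩
      have e0 : (batch_size - ((([] : List Int)).length : Int)).toNat = batch_size.toNat := by
        simp
      rw [ih ((pvInnerA batch_size max_val batch_size.toNat i []).2) s4 (by omega), s1, s2, e0]
      simp
    · rw [if_neg (by tauto), pvGen_nil max_val i hlt, pvChunkL, if_pos (Or.inl rfl)]

-- B's chunking pass = the same proof-side chunking: j advances by batch_size ≥ 1 per step
theorem pvChunkB_eq (batch_size : Int) (vals : List Int) (hb : 0 < batch_size) :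
    ∀ (fuel : Nat) (j : Int), 0 ≤ j → ((vals.length : Int) - j).toNat ≤ fuel →
      pvChunkB batch_size vals fuel j = pvChunkL batch_size (vals.drop j.toNat) := by
  intro fuel
  induction fuel with
  | zero =>
    intro j hj hf
    have hnil : vals.drop j.toNat = [] := by rw [List.drop_eq_nil_iff]; omega
    rw [pvChunkL, if_pos (Or.inl hnil)]
    rfl
  | succ fuel ih =>
    intro j hj hf
    simp only [pvChunkB]
    by_cases hlt : j < (vals.length : Int)
    · rw [if_pos ⟨hb, hlt⟩]
      have hne : vals.drop j.toNat ≠ [] := by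
        rw [ne_eq, List.drop_eq_nil_iff]; omega
      rw [pvChunkL, if_neg (by rw [not_or]; exact ⟨hne, by omega⟩)]
      have hslice : PySem.List.slice vals (some j) (some (j + batch_size)) =
          ((vals.drop j.toNat).take ((j + batch_size).toNat - j.toNat)) :=
        PySem.List.slice_toNat vals hj (by omega)
      have hk : (j + batch_size).toNat - j.toNat = batch_size.toNat := by omega
      have hdrop : (vals.drop j.toNat).drop batch_size.toNat = vals.drop (j + batch_size).toNat := by
        rw [List.drop_drop, show j.toNat + batch_size.toNat = (j + batch_size).toNat from by omega]
      rw [hslice, hk, ih (j + batch_size) (by omega) (by omega), hdrop]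
    · have hnil : vals.drop j.toNat = [] := by rw [List.drop_eq_nil_iff]; omega
      rw [if_neg (by tauto), pvChunkL, if_pos (Or.inl hnil)]

-- ===== VERDICT (by name: the statement is the Claim_ definition above) =====
theorem doubling_spec : Claim_equal_doubling := by
  intro batch_size max_val _ hpre
  unfold Spec_doubling doubling doubling_alt
  rcases Classical.em (0 < batch_size) with hb | hb
  · have hgen : pvGenB max_val max_val.toNat 1 = pvGen max_val 1 :=
      pvGenB_fuel max_val max_val.toNat (max_val - 1).toNat 1 (by omega) (by omega) (by omega)
    rw [hgen,
        pvChunkB_eq batch_size (pvGen max_val 1) hb (pvGen max_val 1).length 0 (by omega) (by omega),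
        pvOuterA_eq batch_size max_val hb max_val.toNat 1 (by omega) (by omega)]
    simp
  · have hmv : max_val ≤ 1 := by
      rcases hpre with h | h
      · exact absurd h hb
      · exact h
    have houter : pvOuterA batch_size max_val max_val.toNat 1 = [] := by
      cases h : max_val.toNat with
      | zero => rfl
      | succ n => simp only [pvOuterA]; rw [if_neg (by omega)]
    have hgen : pvGenB max_val max_val.toNat 1 = [] := by
      cases h : max_val.toNat with
      | zero => rfl
      | succ n => simp only [pvGenB]; rw [if_neg (by omega)]
    rw [houter, hgen]
    rfl
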